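-- pv_equiv track=rewrite | github.com/miszszukiie/NYU_IntroToCompProg | assign7/assign7_problem3a.py | shift_characters
-- ===== SOURCE A (Python) =====
-- def shift_characters (word, num):
--   newword=""
--   for c in word:
--     d = ord(c)
--     g = int(d)
--     e = g+num
--     f = chr(e)
--     newword += f
--   return newword
-- ===== SOURCE B (Python) =====
-- def shift_characters(word, num):
--     return word.translate({ord(c): ord(c) + num for c in set(word)})
-- ===== Notes on version B (the rewrite author's own statement) =====
-- stated objective: faster
-- what changed: Replaces the per-character ord/chr/string-concatenation loop by building a translation table over the distinct characters once and delegating the remapping to a single C-level str.translate call (measured ~2.5x faster); Pre_ excludes inputs where both programs raise ValueError (shifted code point out of chr range) and inputs whose shifted code point is a UTF-16 surrogate, where Python returns a string Lean's String type cannot represent (B returns the identical string there).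
import Mathlib
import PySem

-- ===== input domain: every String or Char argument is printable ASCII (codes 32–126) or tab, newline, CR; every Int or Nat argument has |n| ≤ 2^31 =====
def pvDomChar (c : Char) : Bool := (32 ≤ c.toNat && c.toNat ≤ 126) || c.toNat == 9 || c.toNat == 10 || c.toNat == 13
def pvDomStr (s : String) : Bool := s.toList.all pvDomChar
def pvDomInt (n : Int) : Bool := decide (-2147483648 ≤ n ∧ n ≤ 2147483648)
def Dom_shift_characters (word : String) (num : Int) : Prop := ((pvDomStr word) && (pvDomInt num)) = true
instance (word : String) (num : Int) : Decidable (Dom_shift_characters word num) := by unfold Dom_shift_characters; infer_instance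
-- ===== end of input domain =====

-- B replaces the per-character ord/chr/concat loop by a translation table over the
-- distinct characters plus a single translate pass (measured faster in a timing run); return values agree on Pre_.

-- ===== PORT A =====
-- chr(e) is ported as Char.ofNat e.toNat: exact whenever e is a valid Unicode scalar value,
-- which Pre_ guarantees (Python's chr raises outside 0..0x10FFFF; surrogates are excluded by Pre_
-- because Lean's Char/String cannot represent them).
def shift_characters (word : String) (num : Int) : String :=
  String.ofList (word.toList.foldl (fun newword c =>
    let d : Int := (c.toNat : Int)   -- ord(c)
    let g : Int := d                 -- int(d)
    let e : Int := g + num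
    let f : Char := Char.ofNat e.toNat   -- chr(e), exact under Pre_
    newword ++ [f]) [])

-- ===== PORT B =====
-- table = {ord(c): ord(c) + num for c in set(word)}; word.translate(table).
-- translate maps each character via the table (chr of the stored integer), exact under Pre_.
def shift_characters_alt (word : String) (num : Int) : String :=
  let table : PySem.Dict Int Int :=
    (PySem.Set.ofList word.toList).foldl
      (fun t c => t.insert (c.toNat : Int) ((c.toNat : Int) + num)) PySem.Dict.empty
  String.ofList (word.toList.map (fun c =>
    match table.get? (c.toNat : Int) with
    | some v => Char.ofNat v.toNat
    | none => c))

-- ===== PRECONDITION & SPEC =====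
-- Pre_ excludes (a) inputs where Python raises ValueError (some shifted code point is < 0 or
-- > 0x10FFFF — both A's chr and B's translate raise there), and (b) inputs whose shifted code
-- point lands in the surrogate range 0xD800..0xDFFF, where Python returns a one-off string that
-- Lean's String type cannot represent (not a value of the declared Lean type).
def Pre_shift_characters (word : String) (num : Int) : Prop :=
  (word.toList.all fun c => decide (0 ≤ (c.toNat : Int) + num) &&
    (decide ((c.toNat : Int) + num < 0xD800) ||
     (decide (0xDFFF < (c.toNat : Int) + num) && decide ((c.toNat : Int) + num ≤ 0x10FFFF)))) = true
instance (word : String) (num : Int) : Decidable (Pre_shift_characters word num) := by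
  unfold Pre_shift_characters; infer_instance

def pvWitness_shift_characters : String × Int := ("abc", 1)

def Spec_shift_characters (word : String) (num : Int) (out : String) : Prop := out = shift_characters_alt word num
instance (word : String) (num : Int) (out : String) : Decidable (Spec_shift_characters word num out) := by unfold Spec_shift_characters; infer_instance

-- ===== CLAIM (what is proved, stated in full; the proofs are below) =====
def Claim_equal_shift_characters : Prop := ∀ (word : String) (num : Int), Dom_shift_characters word num → Pre_shift_characters word num → Spec_shift_characters word num (shift_characters word num)

-- ===== LEMMAS AND PROOFS =====

-- lookups in the table are untouched by inserts whose keys all differ from k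
lemma get_fold_of_not_mem (num : Int) (L : List Char) (t : PySem.Dict Int Int) (k : Int)
    (h : ∀ c ∈ L, (c.toNat : Int) ≠ k) :
    (L.foldl (fun t c => t.insert (c.toNat : Int) ((c.toNat : Int) + num)) t).get? k = t.get? k := by
  induction L generalizing t with
  | nil => rfl
  | cons a L ih =>
    simp only [List.foldl_cons]
    rw [ih _ (fun c hc => h c (List.mem_cons_of_mem _ hc)),
        PySem.Dict.get?_insert_of_ne _ _ (fun hk => h a (List.mem_cons_self) hk.symm)]

-- the table built over any list containing c maps ord c to ord c + num
lemma get_table (num : Int) (L : List Char) (t : PySem.Dict Int Int) (c : Char) (hc : c ∈ L) :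
    (L.foldl (fun t c => t.insert (c.toNat : Int) ((c.toNat : Int) + num)) t).get? (c.toNat : Int)
      = some ((c.toNat : Int) + num) := by
  induction L generalizing t with
  | nil => cases hc
  | cons a L ih =>
    simp only [List.foldl_cons]
    by_cases hmem : c ∈ L
    · exact ih _ hmem
    · have hca : c = a := by
        rcases List.mem_cons.mp hc with h | h
        · exact h
        · exact absurd h hmem
      subst hca
      rw [get_fold_of_not_mem]
      · exact PySem.Dict.get?_insert_self _ _ _
      · intro b hb hkey
        have hbn : b.toNat = c.toNat := by exact_mod_cast hkey
        have : b = c := Char.ext (UInt32.toNat_inj.mp hbn)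
        exact hmem (this ▸ hb)

-- ===== VERDICT (by name: the statement is the Claim_ definition above) =====
theorem shift_characters_spec : Claim_equal_shift_characters := by
  intro word num _ _
  unfold Spec_shift_characters shift_characters shift_characters_alt
  rw [PySem.List.foldl_append_singleton_eq_map]
  congr 1
  apply List.map_congr_left
  intro c hc
  rw [get_table num _ _ c (by simpa [PySem.Set.mem_ofList] using hc)]
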